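-- pv_equiv track=rewrite | github.com/amineshx/leetcode | 2818. Apply Operations to Maximize Score/2818. Apply Operations to Maximize Score.py | maximumScore
-- ===== SOURCE A (Python) =====
-- from typing import List
--
-- def maximumScore(nums: List[int], k: int) -> int:
--     def count_the_prime_score(x):
--         count=0
--         dub = set()
--         i=2
--         while x>1:
--             if x%i==0:
--                 x=x//i
--                 if i not in dub:
--                     dub.add(i)
--                     count+=1
--             else:i+=1
--         return count
--     mod = 10**9+7
--     res = 1
--     prime_scores = {}
--     for num in nums:
--         if num not in prime_scores:
--             prime_scores[num]=count_the_prime_score(num)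
--
--     new_nums = [(prime_scores[value],index,value) for index,value in enumerate(nums)]
--     new_nums.sort(key=lambda x: (-x[0], x[1]))
--
--     n = len(nums)
--     left, right = [0] * n, [0] * n
--     stack = []
--
--     for i in range(n):
--         while stack and prime_scores[nums[stack[-1]]] < prime_scores[nums[i]]:
--             stack.pop()
--         left[i] = stack[-1] if stack else -1
--         stack.append(i)
--
--     stack.clear()
--
--     for i in range(n - 1, -1, -1):
--         while stack and prime_scores[nums[stack[-1]]] <= prime_scores[nums[i]]:
--             stack.pop()
--         right[i] = stack[-1] if stack else n
--         stack.append(i)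
--
--     contrib = []
--     for i in range(n):
--         l_range = i - left[i]
--         r_range = right[i] - i
--         contrib.append((nums[i], l_range * r_range))
--
--     contrib.sort(reverse=True, key=lambda x: x[0])
--
--     res, used = 1, 0
--     for value, count in contrib:
--         times = min(k - used, count)
--         for _ in range(times):
--             res = (res * value) % mod
--         used += times
--         if used == k:
--             break
--
--     return res
-- ===== SOURCE B (Python) =====
-- from typing import List
--
-- def maximumScore(nums: List[int], k: int) -> int:
--     def count_the_prime_score(x):
--         count=0
--         dub = set()
--         i=2
--         while x>1:
--             if x%i==0:
--                 x=x//i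
--                 if i not in dub:
--                     dub.add(i)
--                     count+=1
--             else:i+=1
--         return count
--     mod = 10**9+7
--     prime_scores = {}
--     for num in nums:
--         if num not in prime_scores:
--             prime_scores[num]=count_the_prime_score(num)
--     s = [prime_scores[num] for num in nums]
--     n = len(nums)
--     # nearest previous index with score >= s[i] (or -1), nearest next index with score > s[i] (or n),
--     # by direct scans instead of A's two monotonic-stack passes
--     left = [next((j for j in range(i - 1, -1, -1) if s[j] >= s[i]), -1) for i in range(n)]
--     right = [next((j for j in range(i + 1, n) if s[j] > s[i]), n) for i in range(n)]
--     contrib = [(nums[i], (i - left[i]) * (right[i] - i)) for i in range(n)]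
--     contrib.sort(reverse=True, key=lambda x: x[0])
--     res, rem = 1, k
--     for value, count in contrib:
--         if rem <= 0:
--             break
--         t = min(rem, count)
--         res = res * pow(value, t, mod) % mod
--         rem -= t
--     return res
-- ===== Notes on version B (the rewrite author's own statement) =====
-- stated objective: alternative
-- what changed: B replaces A's two monotonic-stack passes by direct nearest greater-or-equal/greater neighbour scans per index, drops A's dead new_nums sort, and replaces A's inner repeated-multiply loop by one modular exponentiation per distinct value.
import Mathlib
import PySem

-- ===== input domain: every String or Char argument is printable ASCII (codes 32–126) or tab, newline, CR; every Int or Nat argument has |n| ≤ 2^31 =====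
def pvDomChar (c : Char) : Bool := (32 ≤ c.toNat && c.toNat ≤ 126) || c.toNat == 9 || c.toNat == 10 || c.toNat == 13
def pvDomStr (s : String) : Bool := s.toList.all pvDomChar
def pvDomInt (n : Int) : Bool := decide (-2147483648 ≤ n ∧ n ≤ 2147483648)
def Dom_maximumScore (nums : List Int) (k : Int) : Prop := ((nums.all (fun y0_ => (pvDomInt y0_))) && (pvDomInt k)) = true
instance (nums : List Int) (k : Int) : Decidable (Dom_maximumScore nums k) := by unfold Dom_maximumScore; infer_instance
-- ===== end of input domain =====

-- B replaces A's two monotonic-stack passes by direct nearest-neighbour scans and the inner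
-- repeated-multiply loop by one modular power per distinct value (objective: alternative).

-- ===== PORT A =====
-- count_the_prime_score's trial-division while-loop (this helper is kept verbatim by B, so it is
-- shared).  The two proof arguments carry the loop invariant "x has no divisor in [2, i)",
-- which is needed only for termination; they do not change the computation.
def psLoop (x i count : Int) (dub : PySem.Set Int)
    (hi : 2 ≤ i) (hinv : ∀ d : Int, 2 ≤ d → d < i → ¬ d ∣ x) : Int :=
  if hx : 1 < x then
    if hz : PySem.Int.mod x i = 0 then
      -- x = x // i; if i not in dub: dub.add(i); count += 1
      psLoop (PySem.Int.floordiv x i) i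
        (if PySem.Set.contains dub i then count else count + 1)
        (PySem.Set.add dub i) hi
        (by
          intro d h2 hdi hdvd
          refine hinv d h2 hdi ?_
          have hdvdx : i ∣ x := (PySem.Int.mod_eq_zero_iff_dvd x i).mp hz
          have hfd : PySem.Int.floordiv x i = x / i :=
            PySem.Int.floordiv_eq_ediv_of_pos (by omega)
          have hx' : i * (x / i) = x := Int.mul_ediv_cancel' hdvdx
          rw [hfd] at hdvd
          exact Dvd.dvd.mul_left hdvd i |>.trans (dvd_of_eq hx'))
    else
      psLoop x (i + 1) count dub (by omega)
        (by
          intro d h2 hdi hdvd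
          rcases lt_or_eq_of_le (by omega : d ≤ i) with h | h
          · exact hinv d h2 h hdvd
          · subst h
            exact hz ((PySem.Int.mod_eq_zero_iff_dvd x d).mpr hdvd))
  else count
termination_by (x.toNat, (x.toNat + 2 - i.toNat))
decreasing_by
  · have hfd : PySem.Int.floordiv x i = x / i :=
      PySem.Int.floordiv_eq_ediv_of_pos (by omega)
    have hx' : x = ((x.toNat : ℕ) : Int) := by omega
    have hi' : i = ((i.toNat : ℕ) : Int) := by omega
    have h1 : PySem.Int.floordiv x i = ((x.toNat / i.toNat : ℕ) : Int) := by
      rw [hx', hi']; exact PySem.Int.floordiv_natCast x.toNat i.toNat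
    have h2 : x.toNat / i.toNat < x.toNat := Nat.div_lt_self (by omega) (by omega)
    apply Prod.Lex.left
    omega
  · -- i ≤ x: x has a prime factor, which is ≥ i by the invariant and ≤ x
    have hx1 : x.toNat ≠ 1 := by omega
    obtain ⟨p, pp, hpd⟩ := Nat.exists_prime_and_dvd hx1
    have hpi : (p : Int) ∣ x := by
      have := Int.natCast_dvd_natCast.mpr hpd
      rwa [Int.toNat_of_nonneg (by omega)] at this
    have h2p : 2 ≤ (p : Int) := by exact_mod_cast pp.two_le
    have hnlt : ¬ (p : Int) < i := fun h => hinv p h2p h hpi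
    have hple : (p : Int) ≤ x := Int.le_of_dvd (by omega) hpi
    have hix : i ≤ x := by omega
    apply Prod.Lex.right
    omega

def countPrimeScore (x : Int) : Int :=
  psLoop x 2 0 PySem.Set.empty (by norm_num) (fun d h2 hd => absurd hd (by omega))

-- for num in nums: if num not in prime_scores: prime_scores[num] = count_the_prime_score(num)
def buildScores (nums : List Int) : PySem.Dict Int Int :=
  nums.foldl
    (fun d num => if d.contains num then d else d.insert num (countPrimeScore num))
    PySem.Dict.empty

-- one monotonic-stack pass of A (used for both of A's stack loops; `pop` is the while-condition,
-- `dflt` the "stack empty" value); answers are emitted in processing order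
def stackPass (score : Int → Int) (pop : Int → Int → Bool) (dflt : Int) :
    List Int → List Int → List Int
  | _, [] => []
  | stk, i :: rest =>
    let stk' := stk.dropWhile (fun j => pop (score j) (score i))
    (stk'.head?.getD dflt) :: stackPass score pop dflt (i :: stk') rest

def scoreA (nums : List Int) (j : Int) : Int :=
  (buildScores nums).getD (PySem.List.pyGetD nums j 0) 0

def leftA (nums : List Int) : List Int :=
  stackPass (scoreA nums) (fun a b => decide (a < b)) (-1) []
    (PySem.List.pyRange 0 (PySem.List.len nums) 1)

def rightA (nums : List Int) : List Int :=
  (stackPass (scoreA nums) (fun a b => decide (a ≤ b)) (PySem.List.len nums) []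
    (PySem.List.pyRange (PySem.List.len nums - 1) (-1) (-1))).reverse

def contribA (nums : List Int) : List (Int × Int) :=
  (PySem.List.pyRange 0 (PySem.List.len nums) 1).map (fun i =>
    (PySem.List.pyGetD nums i 0,
     (i - PySem.List.pyGetD (leftA nums) i 0) * (PySem.List.pyGetD (rightA nums) i 0 - i)))

-- res, used = 1, 0; for value, count in contrib: times = min(k-used, count);
--   for _ in range(times): res = res*value % mod;  used += times;  if used == k: break
def greedyA (M k : Int) : List (Int × Int) → Int → Int → Int
  | [], res, _ => res
  | (v, c) :: rest, res, used =>
    let times := min (k - used) c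
    let res' := (List.range times.toNat).foldl (fun r _ => PySem.Int.mod (r * v) M) res
    let used' := used + times
    if used' = k then res' else greedyA M k rest res' used'

def maximumScore (nums : List Int) (k : Int) : Int :=
  -- new_nums is built and sorted by (-score, index) and then never used (dead code in A)
  let _newNums := PySem.List.sorted2
      ((PySem.List.enumerate nums 0).map (fun p => ((buildScores nums).getD p.2 0, p.1, p.2)))
      (fun t => -t.1) (fun t => t.2.1)
  greedyA 1000000007 k
    (PySem.List.sorted (contribA nums) (fun p => p.1) true) 1 0

-- ===== PORT B =====
-- s = [prime_scores[num] for num in nums]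
def scoreB (nums : List Int) (j : Int) : Int :=
  PySem.List.pyGetD (nums.map (fun num => (buildScores nums).getD num 0)) j 0

-- left[i] = next((j for j in range(i-1,-1,-1) if s[j] >= s[i]), -1)
def leftB (nums : List Int) : List Int :=
  (PySem.List.pyRange 0 (PySem.List.len nums) 1).map (fun i =>
    ((PySem.List.pyRange (i - 1) (-1) (-1)).find?
        (fun j => decide (scoreB nums j ≥ scoreB nums i))).getD (-1))

-- right[i] = next((j for j in range(i+1,n) if s[j] > s[i]), n)
def rightB (nums : List Int) : List Int :=
  (PySem.List.pyRange 0 (PySem.List.len nums) 1).map (fun i =>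
    ((PySem.List.pyRange (i + 1) (PySem.List.len nums) 1).find?
        (fun j => decide (scoreB nums j > scoreB nums i))).getD (PySem.List.len nums))

def contribB (nums : List Int) : List (Int × Int) :=
  (PySem.List.pyRange 0 (PySem.List.len nums) 1).map (fun i =>
    (PySem.List.pyGetD nums i 0,
     (i - PySem.List.pyGetD (leftB nums) i 0) * (PySem.List.pyGetD (rightB nums) i 0 - i)))

-- res, rem = 1, k; for value, count in contrib: if rem <= 0: break;
--   t = min(rem, count); res = res * pow(value, t, mod) % mod; rem -= t
def greedyB (M : Int) : List (Int × Int) → Int → Int → Int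
  | [], res, _ => res
  | (v, c) :: rest, res, rem =>
    if rem ≤ 0 then res
    else
      let t := min rem c
      greedyB M rest (PySem.Int.mod (res * PySem.Int.powMod v t.toNat M) M) (rem - t)

def maximumScore_alt (nums : List Int) (k : Int) : Int :=
  greedyB 1000000007
    (PySem.List.sorted (contribB nums) (fun p => p.1) true) 1 k

-- ===== PRECONDITION & SPEC =====
def Spec_maximumScore (nums : List Int) (k : Int) (out : Int) : Prop := out = maximumScore_alt nums k
instance (nums : List Int) (k : Int) (out : Int) : Decidable (Spec_maximumScore nums k out) := by unfold Spec_maximumScore; infer_instance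

-- ===== CLAIM (what is proved, stated in full; the proofs are below) =====
def Claim_equal_maximumScore : Prop := ∀ (nums : List Int) (k : Int), Dom_maximumScore nums k → Spec_maximumScore nums k (maximumScore nums k)

-- ===== LEMMAS AND PROOFS =====

-- what A's monotonic stack holds after the (reversed) history `h` has been processed
def specStack (s : Int → Int) (pop : Int → Int → Bool) : List Int → List Int
  | [] => []
  | c :: h => c :: (specStack s pop h).filter (fun j => !pop (s j) (s c))

-- the answers of a stack pass, phrased as a linear search through the reversed history
def specAns (s : Int → Int) (pop : Int → Int → Bool) (dflt : Int) :
    List Int → List Int → List Int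
  | _, [] => []
  | h, c :: rest =>
    ((h.find? (fun j => !pop (s j) (s c))).getD dflt) :: specAns s pop dflt (c :: h) rest

lemma pairwise_specStack (s : Int → Int) (pop : Int → Int → Bool) (h : List Int) :
    (specStack s pop h).Pairwise (fun a b => pop (s b) (s a) = false) := by
  induction h with
  | nil => simp [specStack]
  | cons c h ih =>
    refine List.Pairwise.cons ?_ (ih.filter _)
    intro b hb
    have := (List.mem_filter.mp hb).2
    simpa using this

lemma dropWhile_eq_filter_not {α : Type} (p : α → Bool) :
    ∀ l : List α, l.Pairwise (fun a b => p b = true → p a = true) →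
      l.dropWhile p = l.filter (fun x => !p x) := by
  intro l hl
  induction l with
  | nil => rfl
  | cons a t ih =>
    rcases List.pairwise_cons.mp hl with ⟨h1, ht⟩
    cases hpa : p a with
    | true => simp [List.dropWhile, List.filter, hpa, ih ht]
    | false =>
      simp only [List.dropWhile, List.filter, hpa]
      simp only [Bool.not_false]
      rw [List.filter_eq_self.mpr]
      intro b hb
      cases hpb : p b with
      | true => exact absurd (h1 b hb hpb) (by simp [hpa])
      | false => simp

lemma find?_filter_of_imp {α : Type} (p q : α → Bool) (himp : ∀ x, q x = true → p x = true) :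
    ∀ l : List α, (l.filter p).find? q = l.find? q := by
  intro l
  induction l with
  | nil => rfl
  | cons a t ih =>
    cases hqa : q a with
    | true =>
      have hpa := himp a hqa
      simp [List.filter, hpa, List.find?, hqa]
    | false =>
      cases hpa : p a with
      | true => simp [List.filter, hpa, List.find?, hqa, ih]
      | false => simp [List.filter, hpa, List.find?, hqa, ih]

lemma find?_specStack (s : Int → Int) (pop : Int → Int → Bool)
    (Htrans : ∀ x y z : Int, pop x y = true → pop y z = true → pop x z = true) :
    ∀ (h : List Int) (c : Int),
      (specStack s pop h).find? (fun j => !pop (s j) (s c)) =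
        h.find? (fun j => !pop (s j) (s c)) := by
  intro h c
  induction h with
  | nil => rfl
  | cons a r ih =>
    by_cases hpa : pop (s a) (s c) = true
    · have ha' : (fun j => !pop (s j) (s c)) a = false := by simp [hpa]
      simp only [specStack, List.find?, ha']
      rw [find?_filter_of_imp _ _ ?_, ih]
      intro x hx
      simp only [Bool.not_eq_true'] at hx ⊢
      by_contra hcon
      simp only [Bool.not_eq_false] at hcon
      exact absurd (Htrans _ _ _ hcon hpa) (by simp [hx])
    · have ha' : (fun j => !pop (s j) (s c)) a = true := by simp [hpa]
      simp [specStack, List.find?, ha']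

lemma stackPass_eq_specAns (s : Int → Int) (pop : Int → Int → Bool) (dflt : Int)
    (Htrans : ∀ x y z : Int, pop x y = true → pop y z = true → pop x z = true)
    (Hmono : ∀ x y z : Int, pop x y = false → pop x z = true → pop y z = true) :
    ∀ (order h : List Int),
      stackPass s pop dflt (specStack s pop h) order = specAns s pop dflt h order := by
  intro order
  induction order with
  | nil => intro h; rfl
  | cons c rest ih =>
    intro h
    have hdrop : (specStack s pop h).dropWhile (fun j => pop (s j) (s c)) =
        (specStack s pop h).filter (fun j => !pop (s j) (s c)) := by
      apply dropWhile_eq_filter_not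
      refine (pairwise_specStack s pop h).imp ?_
      intro a b hab hb
      exact Hmono (s b) (s a) (s c) hab hb
    have hhd : ((specStack s pop h).filter (fun j => !pop (s j) (s c))).head? =
        h.find? (fun j => !pop (s j) (s c)) := by
      rw [List.head?_filter, find?_specStack s pop Htrans]
    show (((specStack s pop h).dropWhile (fun j => pop (s j) (s c))).head?.getD dflt) ::
        stackPass s pop dflt (c :: (specStack s pop h).dropWhile (fun j => pop (s j) (s c))) rest =
      _
    rw [hdrop, hhd]
    have hstk : c :: (specStack s pop h).filter (fun j => !pop (s j) (s c)) =
        specStack s pop (c :: h) := rfl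
    rw [hstk, ih (c :: h)]
    rfl

-- the two instantiations of the history lemma

lemma specAns_left (s : Int → Int) :
    ∀ (m : ℕ) (a : Int), 0 ≤ a →
      specAns s (fun a b => decide (a < b)) (-1)
          ((PySem.List.pyRange 0 a 1).reverse) (PySem.List.pyRange a (a + m) 1) =
        (PySem.List.pyRange a (a + m) 1).map (fun c =>
          (((PySem.List.pyRange 0 c 1).reverse).find?
            (fun j => !decide (s j < s c))).getD (-1)) := by
  intro m
  induction m with
  | zero =>
    intro a _
    simp only [Nat.cast_zero, add_zero]
    rw [PySem.List.pyRange_one_eq_nil (le_refl a)]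
    rfl
  | succ m ih =>
    intro a ha
    rw [PySem.List.pyRange_one_cons (by push_cast; omega : a < a + (m + 1 : ℕ))]
    show (( ((PySem.List.pyRange 0 a 1).reverse).find? (fun j => !decide (s j < s a))).getD (-1)) ::
        specAns s (fun a b => decide (a < b)) (-1)
          (a :: (PySem.List.pyRange 0 a 1).reverse) (PySem.List.pyRange (a+1) (a + (m+1:ℕ)) 1) = _
    have hhist : a :: (PySem.List.pyRange 0 a 1).reverse =
        (PySem.List.pyRange 0 (a + 1) 1).reverse := by
      rw [PySem.List.pyRange_one_succ_right (by omega)]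
      simp
    have harg : a + (m + 1 : ℕ) = (a + 1) + (m : ℕ) := by push_cast; ring
    rw [hhist, harg, ih (a + 1) (by omega)]
    simp

lemma specAns_right (s : Int → Int) (n : Int) :
    ∀ (m : ℕ) (a : Int), (a + 1).toNat = m → a < n →
      specAns s (fun a b => decide (a ≤ b)) n
          (PySem.List.pyRange (a + 1) n 1) (PySem.List.pyRange a (-1) (-1)) =
        (PySem.List.pyRange a (-1) (-1)).map (fun c =>
          ((PySem.List.pyRange (c + 1) n 1).find?
            (fun j => !decide (s j ≤ s c))).getD n) := by
  intro m
  induction m with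
  | zero =>
    intro a hm _
    rw [PySem.List.pyRange_neg_one_eq_nil (by omega)]
    rfl
  | succ m ih =>
    intro a hm han
    have ha0 : 0 ≤ a := by omega
    rw [PySem.List.pyRange_neg_one_cons (by omega : (-1:Int) < a)]
    show ((((PySem.List.pyRange (a+1) n 1)).find? (fun j => !decide (s j ≤ s a))).getD n) ::
        specAns s (fun a b => decide (a ≤ b)) n
          (a :: PySem.List.pyRange (a+1) n 1) (PySem.List.pyRange (a-1) (-1) (-1)) = _
    have hhist : a :: PySem.List.pyRange (a+1) n 1 = PySem.List.pyRange a n 1 :=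
      (PySem.List.pyRange_one_cons han).symm
    have harg : a = (a - 1) + 1 := by ring
    rw [hhist]
    rw [show PySem.List.pyRange a n 1 = PySem.List.pyRange ((a-1)+1) n 1 by rw [← harg]]
    rw [ih (a - 1) (by omega) (by omega)]
    simp


lemma find?_congr_mem {α : Type} (p q : α → Bool) :
    ∀ l : List α, (∀ x ∈ l, p x = q x) → l.find? p = l.find? q := by
  intro l
  induction l with
  | nil => intro _; rfl
  | cons a t ih =>
    intro h
    have ha := h a (by simp)
    cases hq : q a with
    | true => simp [List.find?, ha, hq]
    | false => simp [List.find?, ha, hq]; exact ih (fun x hx => h x (by simp [hx]))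

lemma decide_ge_eq (a b : Int) : decide (a ≥ b) = !decide (a < b) := by
  by_cases h : a < b
  · simp only [h, decide_true, Bool.not_true, decide_eq_false_iff_not]
    omega
  · simp only [h, decide_false, Bool.not_false, decide_eq_true_eq]
    omega

lemma decide_gt_eq (a b : Int) : decide (a > b) = !decide (a ≤ b) := by
  by_cases h : a ≤ b
  · simp only [h, decide_true, Bool.not_true, decide_eq_false_iff_not]
    omega
  · simp only [h, decide_false, Bool.not_false, decide_eq_true_eq]
    omega

lemma score_eq (nums : List Int) (j : Int) (h0 : 0 ≤ j) (h1 : j < PySem.List.len nums) :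
    scoreB nums j = scoreA nums j := by
  have hlen : j < (nums.length : Int) := by
    simpa [PySem.List.len] using h1
  unfold scoreB scoreA
  rw [PySem.List.pyGetD_eq_getElem _ _ h0 (by simpa using hlen),
      PySem.List.pyGetD_eq_getElem _ _ h0 hlen]
  simp

lemma left_eq (nums : List Int) : leftA nums = leftB nums := by
  have hn0 : (0:Int) ≤ PySem.List.len nums := by simp [PySem.List.len]
  set n := PySem.List.len nums with hn
  have htrans : ∀ x y z : Int, (decide (x < y)) = true → (decide (y < z)) = true →
      (decide (x < z)) = true := by intro x y z hx hy; simp at *; omega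
  have hmono : ∀ x y z : Int, (decide (x < y)) = false → (decide (x < z)) = true →
      (decide (y < z)) = true := by intro x y z hx hy; simp at *; omega
  have h1 : leftA nums = specAns (scoreA nums) (fun a b => decide (a < b)) (-1) []
      (PySem.List.pyRange 0 n 1) := by
    unfold leftA
    exact stackPass_eq_specAns _ _ _ htrans hmono _ []
  have h2 : ([] : List Int) = (PySem.List.pyRange 0 0 1).reverse := by
    rw [PySem.List.pyRange_one_eq_nil (le_refl 0)]; rfl
  have h3 : n = 0 + ((n.toNat : ℕ) : Int) := by omega
  rw [h1, h2, show PySem.List.pyRange 0 n 1 = PySem.List.pyRange 0 (0 + ((n.toNat : ℕ) : Int)) 1 by rw [← h3],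
      specAns_left (scoreA nums) n.toNat 0 (le_refl 0), ← h3]
  unfold leftB
  rw [← hn]
  apply List.map_congr_left
  intro c hc
  rcases PySem.List.mem_pyRange_one.mp hc with ⟨hc0, hcn⟩
  have hrange : PySem.List.pyRange (c - 1) (-1) (-1) = (PySem.List.pyRange 0 c 1).reverse := by
    rw [PySem.List.pyRange_neg_one_eq_reverse]
    norm_num
  rw [hrange]
  congr 1
  apply find?_congr_mem
  intro j hj
  rcases PySem.List.mem_pyRange_one.mp (List.mem_reverse.mp hj) with ⟨hj0, hjc⟩
  rw [score_eq nums j hj0 (by omega), score_eq nums c hc0 (by omega), decide_ge_eq]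

lemma right_eq (nums : List Int) : rightA nums = rightB nums := by
  have hn0 : (0:Int) ≤ PySem.List.len nums := by simp [PySem.List.len]
  set n := PySem.List.len nums with hn
  have htrans : ∀ x y z : Int, (decide (x ≤ y)) = true → (decide (y ≤ z)) = true →
      (decide (x ≤ z)) = true := by intro x y z hx hy; simp at *; omega
  have hmono : ∀ x y z : Int, (decide (x ≤ y)) = false → (decide (x ≤ z)) = true →
      (decide (y ≤ z)) = true := by intro x y z hx hy; simp at *; omega
  have h1 : rightA nums = (specAns (scoreA nums) (fun a b => decide (a ≤ b)) n []
      (PySem.List.pyRange (n - 1) (-1) (-1))).reverse := by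
    unfold rightA
    rw [← hn]
    congr 1
    exact stackPass_eq_specAns _ _ _ htrans hmono _ []
  have h2 : ([] : List Int) = PySem.List.pyRange ((n - 1) + 1) n 1 := by
    rw [PySem.List.pyRange_one_eq_nil (by omega)]
  rw [h1, h2, specAns_right (scoreA nums) n (n - 1 + 1).toNat (n - 1) rfl (by omega)]
  have hrev : PySem.List.pyRange (n - 1) (-1) (-1) = (PySem.List.pyRange 0 n 1).reverse := by
    rw [PySem.List.pyRange_neg_one_eq_reverse]
    norm_num
  rw [hrev, ← List.map_reverse, List.reverse_reverse]
  unfold rightB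
  rw [← hn]
  apply List.map_congr_left
  intro c hc
  rcases PySem.List.mem_pyRange_one.mp hc with ⟨hc0, hcn⟩
  congr 1
  apply find?_congr_mem
  intro j hj
  rcases PySem.List.mem_pyRange_one.mp hj with ⟨hj0, hjn⟩
  rw [score_eq nums j (by omega) (by omega), score_eq nums c hc0 (by omega), decide_gt_eq]

lemma contrib_eq (nums : List Int) : contribA nums = contribB nums := by
  unfold contribA contribB
  rw [left_eq, right_eq]

lemma contrib_counts (nums : List Int) :
    ∀ p ∈ contribB nums, 1 ≤ p.2 := by
  intro p hp
  unfold contribB at hp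
  rcases List.mem_map.mp hp with ⟨i, hi, rfl⟩
  rcases PySem.List.mem_pyRange_one.mp hi with ⟨hi0, hin⟩
  set n := PySem.List.len nums with hn
  have hL : PySem.List.pyGetD (leftB nums) i 0 ≤ i - 1 := by
    unfold leftB
    rw [← hn, PySem.List.pyGetD_map_pyRange_of_nonneg _ _ _ _ hi0 hin]
    cases hf : (PySem.List.pyRange (i - 1) (-1) (-1)).find?
        (fun j => decide (scoreB nums j ≥ scoreB nums i)) with
    | none => simp; omega
    | some j =>
      have := PySem.List.mem_pyRange_neg_one.mp (List.mem_of_find?_eq_some hf)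
      simp
      omega
  have hR : i + 1 ≤ PySem.List.pyGetD (rightB nums) i 0 := by
    unfold rightB
    rw [← hn, PySem.List.pyGetD_map_pyRange_of_nonneg _ _ _ _ hi0 hin]
    cases hf : (PySem.List.pyRange (i + 1) n 1).find?
        (fun j => decide (scoreB nums j > scoreB nums i)) with
    | none => simp; omega
    | some j =>
      have := PySem.List.mem_pyRange_one.mp (List.mem_of_find?_eq_some hf)
      simp
      omega
  have h1 : 1 ≤ i - PySem.List.pyGetD (leftB nums) i 0 := by omega
  have h2 : 1 ≤ PySem.List.pyGetD (rightB nums) i 0 - i := by omega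
  have := mul_le_mul h1 h2 (by norm_num) (by omega)
  simpa using this

lemma fold_mul_mod (M v : Int) (hM : 0 < M) :
    ∀ (t : ℕ), t ≠ 0 → ∀ r : Int,
      (List.range t).foldl (fun r _ => PySem.Int.mod (r * v) M) r = (r * v ^ t) % M := by
  intro t
  induction t with
  | zero => intro h; exact absurd rfl h
  | succ t ih =>
    intro _ r
    rw [List.range_succ, List.foldl_append]
    rcases Nat.eq_zero_or_pos t with ht | ht
    · subst ht
      simp [PySem.Int.mod_eq_emod_of_pos hM]
    · rw [ih (by omega) r]
      simp only [List.foldl_cons, List.foldl_nil]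
      rw [PySem.Int.mod_eq_emod_of_pos hM]
      conv_lhs => rw [Int.mul_emod, Int.emod_emod_of_dvd _ dvd_rfl, ← Int.mul_emod]
      rw [pow_succ, mul_assoc]

lemma greedyB_nonpos (M : Int) (l : List (Int × Int)) (res rem : Int) (h : rem ≤ 0) :
    greedyB M l res rem = res := by
  cases l with
  | nil => rfl
  | cons p rest => cases p; simp [greedyB, h]

lemma greedy_eq (M k : Int) (hM : 0 < M) :
    ∀ (l : List (Int × Int)) (res used : Int), (∀ p ∈ l, 1 ≤ p.2) →
      greedyA M k l res used = greedyB M l res (k - used) := by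
  intro l
  induction l with
  | nil => intro res used _; rfl
  | cons p rest ih =>
    rcases p with ⟨v, c⟩
    intro res used hcnt
    have hc1 : 1 ≤ c := hcnt (v, c) (by simp)
    by_cases hrem : k - used ≤ 0
    · have htimes : min (k - used) c = k - used := min_eq_left (by omega)
      simp only [greedyA, greedyB, htimes, hrem, if_true]
      rw [show (k - used).toNat = 0 from by omega]
      simp only [List.range_zero, List.foldl_nil]
      rw [if_pos (by omega)]
    · have ht1 : 1 ≤ min (k - used) c := le_min (by omega) hc1
      have hresA : (List.range (min (k - used) c).toNat).foldl
          (fun r _ => PySem.Int.mod (r * v) M) res =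
          (res * v ^ (min (k - used) c).toNat) % M :=
        fold_mul_mod M v hM _ (by omega) res
      have hresB : PySem.Int.mod (res * PySem.Int.powMod v (min (k - used) c).toNat M) M =
          (res * v ^ (min (k - used) c).toNat) % M := by
        simp only [PySem.Int.powMod]
        rw [PySem.Int.mod_eq_emod_of_pos hM, PySem.Int.mod_eq_emod_of_pos hM]
        conv_lhs => rw [Int.mul_emod, Int.emod_emod_of_dvd _ dvd_rfl, ← Int.mul_emod]
      simp only [greedyA, greedyB, if_neg hrem]
      rw [hresA]
      by_cases heq : used + min (k - used) c = k
      · rw [if_pos heq]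
        rw [greedyB_nonpos M rest _ _ (by omega), hresB]
      · rw [if_neg heq]
        rw [ih _ _ (fun q hq => hcnt q (by simp [hq])), hresB]
        congr 1
        omega

lemma maximumScore_eq_alt (nums : List Int) (k : Int) :
    maximumScore nums k = maximumScore_alt nums k := by
  have hA : maximumScore nums k = greedyA 1000000007 k
      (PySem.List.sorted (contribA nums) (fun p => p.1) true) 1 0 := rfl
  rw [hA, contrib_eq]
  have hcnt : ∀ p ∈ PySem.List.sorted (contribB nums) (fun p => p.1) true, 1 ≤ p.2 := by
    intro p hp
    exact contrib_counts nums p ((PySem.List.mem_sorted _ _ _ _).mp hp)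
  rw [greedy_eq 1000000007 k (by norm_num) _ 1 0 hcnt]
  unfold maximumScore_alt
  norm_num

-- ===== VERDICT (by name: the statement is the Claim_ definition above) =====
theorem maximumScore_spec : Claim_equal_maximumScore := by
  intro nums k _
  unfold Spec_maximumScore
  exact maximumScore_eq_alt nums k
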